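-- pv_equiv track=rewrite | github.com/BoggartABR/Boggart | abr_algs/boggart/contextual_exp3.py | calc_inner_index
-- ===== SOURCE A (Python) =====
-- def calc_inner_index(dim, idx):
--     assert len(dim) == len(idx)
--     if len(dim) == 0:
--         return 0
--     tmp = 1
--     for i in dim[1:]:
--         tmp *= i
--     return idx[0] * tmp + calc_inner_index(dim[1:], idx[1:])
-- ===== SOURCE B (Python) =====
-- def calc_inner_index(dim, idx):
--     assert len(dim) == len(idx)
--     acc = 0
--     for d, i in zip(dim, idx):
--         acc = acc * d + i
--     return acc
-- ===== Notes on version B (the rewrite author's own statement) =====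
-- stated objective: faster
-- what changed: Replaces A's recursion that recomputes the product of the remaining dimensions at every level (O(n^2) multiplications) with a single left-to-right Horner pass over zip(dim, idx) maintaining one accumulator.
import Mathlib
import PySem

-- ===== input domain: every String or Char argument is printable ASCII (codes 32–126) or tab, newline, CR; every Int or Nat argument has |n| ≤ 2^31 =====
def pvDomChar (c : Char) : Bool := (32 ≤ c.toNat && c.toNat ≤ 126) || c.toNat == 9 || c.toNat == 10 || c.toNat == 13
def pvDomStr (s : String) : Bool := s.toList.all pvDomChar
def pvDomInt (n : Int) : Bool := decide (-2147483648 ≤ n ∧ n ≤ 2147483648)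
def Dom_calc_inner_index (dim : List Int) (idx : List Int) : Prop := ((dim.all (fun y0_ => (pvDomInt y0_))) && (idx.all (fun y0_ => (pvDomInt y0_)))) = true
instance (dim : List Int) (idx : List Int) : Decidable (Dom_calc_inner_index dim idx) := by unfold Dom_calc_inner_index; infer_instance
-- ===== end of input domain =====

-- B replaces A's recursion (which recomputes the product of the remaining dimensions
-- at every level) by a single left-to-right Horner pass over zip(dim, idx). Objective: faster.

-- ===== PORT A =====
-- A: if dim empty return 0; else tmp = product of dim[1:] (explicit foldl over dim[1:]),
-- then idx[0] * tmp + recursive call on the tails. idx[0] on empty idx raises (excluded by Pre_);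
-- the port returns 0 in that unreachable branch.
def calc_inner_index (dim : List Int) (idx : List Int) : Int :=
  match dim with
  | [] => 0
  | _ :: ds =>
    let tmp : Int := ds.foldl (fun t i => t * i) 1
    match idx with
    | [] => 0
    | i0 :: is => i0 * tmp + calc_inner_index ds is

-- ===== PORT B =====
-- B: acc = 0; for (d, i) in zip(dim, idx): acc = acc * d + i; return acc.
def calc_inner_index_alt (dim : List Int) (idx : List Int) : Int :=
  (List.zip dim idx).foldl (fun acc p => acc * p.1 + p.2) 0

-- ===== PRECONDITION & SPEC =====
-- Pre_ excludes inputs of unequal lengths, on which A's 'assert len(dim) == len(idx)'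
-- raises AssertionError (A returns no value there).
def Pre_calc_inner_index (dim : List Int) (idx : List Int) : Prop := dim.length = idx.length
instance (dim : List Int) (idx : List Int) : Decidable (Pre_calc_inner_index dim idx) := by unfold Pre_calc_inner_index; infer_instance
def pvWitness_calc_inner_index : List Int × List Int := ([2, 3, 4], [1, 0, 2])
def Spec_calc_inner_index (dim : List Int) (idx : List Int) (out : Int) : Prop := out = calc_inner_index_alt dim idx
instance (dim : List Int) (idx : List Int) (out : Int) : Decidable (Spec_calc_inner_index dim idx out) := by unfold Spec_calc_inner_index; infer_instance

-- ===== CLAIM (what is proved, stated in full; the proofs are below) =====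
def Claim_equal_calc_inner_index : Prop := ∀ (dim : List Int) (idx : List Int), Dom_calc_inner_index dim idx → Pre_calc_inner_index dim idx → Spec_calc_inner_index dim idx (calc_inner_index dim idx)

-- ===== LEMMAS AND PROOFS =====

-- pulling a factor out of the running product
lemma foldl_mul_shift (ds : List Int) (a : Int) :
    ds.foldl (fun t i => t * i) a = a * ds.foldl (fun t i => t * i) 1 := by
  induction ds generalizing a with
  | nil => simp
  | cons d ds ih =>
    simp only [List.foldl_cons]
    rw [ih (a * d), ih (1 * d)]
    ring

-- Horner invariant: the fold from accumulator a equals a times the full product plus A's value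
lemma horner_key (ds is : List Int) (a : Int) (h : ds.length = is.length) :
    (List.zip ds is).foldl (fun acc p => acc * p.1 + p.2) a
      = a * ds.foldl (fun t i => t * i) 1 + calc_inner_index ds is := by
  induction ds generalizing is a with
  | nil =>
    cases is with
    | nil => simp [calc_inner_index]
    | cons i is => simp at h
  | cons d ds ih =>
    cases is with
    | nil => simp at h
    | cons i is =>
      simp only [List.length_cons, Nat.add_right_cancel_iff] at h
      simp only [List.zip_cons_cons, List.foldl_cons, calc_inner_index]
      rw [ih is (a * d + i) h, foldl_mul_shift ds (1 * d)]
      ring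

-- ===== VERDICT (by name: the statement is the Claim_ definition above) =====
theorem calc_inner_index_spec : Claim_equal_calc_inner_index := by
  intro dim idx _ hpre
  unfold Spec_calc_inner_index calc_inner_index_alt
  rw [horner_key dim idx 0 hpre]
  ring
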